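-- pv_equiv track=rewrite | github.com/marcomc/raiplaysound-cli | tools/audit_program_groupings.py | normalize_token
-- ===== SOURCE A (Python) =====
-- def normalize_token(value: str) -> str:
--     chunks: list[str] = []
--     last_dash = False
--     for char in value.lower():
--         if char.isalnum():
--             chunks.append(char)
--             last_dash = False
--             continue
--         if not last_dash:
--             chunks.append("-")
--             last_dash = True
--     return "".join(chunks).strip("-")
-- ===== SOURCE B (Python) =====
-- def normalize_token(value: str) -> str:
--     """Run-segmentation instead of a per-char last_dash flag: scan maximal runs,
--     keep alphanumeric runs, emit one '-' per non-alphanumeric run."""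
--     s = value.lower()
--     parts = []
--     i = 0
--     n = len(s)
--     while i < n:
--         j = i
--         if s[i].isalnum():
--             while j < n and s[j].isalnum():
--                 j += 1
--             parts.append(s[i:j])
--         else:
--             while j < n and not s[j].isalnum():
--                 j += 1
--             parts.append('-')
--         i = j
--     return ''.join(parts).strip('-')
-- ===== Notes on version B (the rewrite author's own statement) =====
-- stated objective: alternative
-- what changed: Replaces the per-character last_dash flag loop by run-segmentation: an index scan over maximal alnum / non-alnum runs, appending the run or a single dash per run.
import Mathlib
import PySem

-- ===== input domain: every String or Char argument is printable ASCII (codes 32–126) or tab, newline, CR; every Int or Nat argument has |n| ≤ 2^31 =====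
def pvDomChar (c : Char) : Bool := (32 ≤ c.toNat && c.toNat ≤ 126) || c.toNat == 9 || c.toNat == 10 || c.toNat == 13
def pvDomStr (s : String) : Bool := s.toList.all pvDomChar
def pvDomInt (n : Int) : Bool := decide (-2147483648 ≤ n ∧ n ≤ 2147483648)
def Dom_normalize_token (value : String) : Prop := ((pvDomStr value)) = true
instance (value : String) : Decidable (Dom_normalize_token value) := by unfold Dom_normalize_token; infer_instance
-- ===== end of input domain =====

-- B replaces A's per-character last_dash flag with run-segmentation (one dash per non-alnum run); same result.

-- ===== PORT A =====
-- one iteration of A's for-loop: state = (chunks, last_dash)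
def normStepA (st : List Char × Bool) (c : Char) : List Char × Bool :=
  if PySem.Chars.isalnum c then (st.1 ++ [c], false)
  else if !st.2 then (st.1 ++ ['-'], true) else st

def normalize_token (value : String) : String :=
  String.ofList (PySem.Chars.stripChars
    (((PySem.Chars.lower value.toList).foldl normStepA ([], false)).1) ['-'])

-- ===== PORT B =====
-- B's while-loop: split into maximal runs, keep alnum runs, one '-' per non-alnum run
def altRuns : List Char → List (List Char)
  | [] => []
  | c :: cs =>
    if PySem.Chars.isalnum c then
      (c :: cs.takeWhile PySem.Chars.isalnum) :: altRuns (cs.dropWhile PySem.Chars.isalnum)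
    else
      ['-'] :: altRuns (cs.dropWhile (fun x => !PySem.Chars.isalnum x))
termination_by s => s.length
decreasing_by
  · exact Nat.lt_succ_of_le (List.length_dropWhile_le _ _)
  · exact Nat.lt_succ_of_le (List.length_dropWhile_le _ _)

def normalize_token_alt (value : String) : String :=
  String.ofList (PySem.Chars.stripChars
    ((altRuns (PySem.Chars.lower value.toList)).flatten) ['-'])

-- ===== PRECONDITION & SPEC =====
def Spec_normalize_token (value : String) (out : String) : Prop := out = normalize_token_alt value
instance (value : String) (out : String) : Decidable (Spec_normalize_token value out) := by unfold Spec_normalize_token; infer_instance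

-- ===== CLAIM (what is proved, stated in full; the proofs are below) =====
def Claim_equal_normalize_token : Prop := ∀ (value : String), Dom_normalize_token value → Spec_normalize_token value (normalize_token value)

-- ===== LEMMAS AND PROOFS =====

-- what A's loop leaves in chunks after the already-emitted prefix, as a recursion on the chars
def restA : List Char → Bool → List Char
  | [], _ => []
  | c :: cs, b =>
    if PySem.Chars.isalnum c then c :: restA cs false
    else (if b then [] else ['-']) ++ restA cs true

theorem foldl_normStepA (s : List Char) (acc : List Char) (b : Bool) :
    (s.foldl normStepA (acc, b)).1 = acc ++ restA s b := by
  induction s generalizing acc b with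
  | nil => simp [restA]
  | cons c cs ih =>
    simp only [List.foldl_cons, normStepA, restA]
    by_cases h : PySem.Chars.isalnum c = true
    · simp [h, ih]
    · cases b <;> simp [h, ih]

theorem restA_false_run (cs : List Char) :
    restA cs false = cs.takeWhile PySem.Chars.isalnum ++
      restA (cs.dropWhile PySem.Chars.isalnum) false := by
  induction cs with
  | nil => simp [restA]
  | cons c cs ih =>
    by_cases h : PySem.Chars.isalnum c = true
    · simp [restA, h, ih]
    · simp [h]

theorem restA_true_drop (cs : List Char) :
    restA cs true = restA (cs.dropWhile (fun x => !PySem.Chars.isalnum x)) false := by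
  induction cs with
  | nil => simp [restA]
  | cons c cs ih =>
    by_cases h : PySem.Chars.isalnum c = true
    · simp [h, restA]
    · simpa [List.dropWhile_cons, h, restA] using ih

theorem flatten_altRuns (s : List Char) : (altRuns s).flatten = restA s false := by
  induction s using altRuns.induct with
  | case1 => simp [altRuns, restA]
  | case2 c cs h ih =>
    rw [altRuns, if_pos h, List.flatten_cons, ih]
    conv_rhs => rw [restA, if_pos h, restA_false_run cs]
    simp
  | case3 c cs h ih =>
    rw [altRuns, if_neg h, List.flatten_cons, ih]
    conv_rhs => rw [restA, if_neg h, restA_true_drop cs]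
    simp

-- ===== VERDICT (by name: the statement is the Claim_ definition above) =====
theorem normalize_token_spec : Claim_equal_normalize_token := by
  intro value _
  unfold Spec_normalize_token normalize_token normalize_token_alt
  rw [flatten_altRuns, foldl_normStepA, List.nil_append]
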